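-- pv_equiv track=rewrite | github.com/dcavaltria/ValtriaPyTools.extension | ValtriaPyTools.tab/00.AI.panel/🜂Ephyra.pushbutton/script.py | choose_best_model
-- ===== SOURCE A (Python) =====
-- def choose_best_model(available):
--     preferences = [
--         "claude-3-5-sonnet",
--         "claude-3-5-haiku",
--         "claude-3-opus",
--         "claude-3-sonnet",
--         "claude-3-haiku",
--         "claude-3"
--     ]
--     for pref in preferences:
--         for name in available:
--             if name.startswith(pref):
--                 return name
--     return available[0] if available else None
-- ===== SOURCE B (Python) =====
-- def choose_best_model(available):
--     preferences = [
--         "claude-3-5-sonnet",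
--         "claude-3-5-haiku",
--         "claude-3-opus",
--         "claude-3-sonnet",
--         "claude-3-haiku",
--         "claude-3"
--     ]
--
--     def rank(name):
--         for i, pref in enumerate(preferences):
--             if name.startswith(pref):
--                 return i
--         return len(preferences)
--
--     return min(available, key=rank) if available else None
-- ===== Notes on version B (the rewrite author's own statement) =====
-- stated objective: alternative
-- what changed: Replaced the preference-outer/available-inner double loop with a rank(name) key (index of first matching prefix, sentinel len(preferences)) and a single min over available, whose first-minimum tie-break reproduces A's order and whose all-sentinel case yields available[0].
import Mathlib
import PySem

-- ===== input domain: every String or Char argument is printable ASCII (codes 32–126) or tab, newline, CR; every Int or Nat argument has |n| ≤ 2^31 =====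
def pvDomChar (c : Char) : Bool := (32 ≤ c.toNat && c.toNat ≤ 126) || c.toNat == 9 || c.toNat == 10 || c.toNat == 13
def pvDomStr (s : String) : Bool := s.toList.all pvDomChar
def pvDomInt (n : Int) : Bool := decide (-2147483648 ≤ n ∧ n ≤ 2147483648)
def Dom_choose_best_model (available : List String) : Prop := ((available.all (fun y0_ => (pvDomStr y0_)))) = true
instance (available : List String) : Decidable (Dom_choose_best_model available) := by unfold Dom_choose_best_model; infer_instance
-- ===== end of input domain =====

-- B replaces A's preference-outer double loop by a rank key and a single first-minimum
-- scan over available (objective: alternative decomposition, same cost).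

-- ===== PORT A =====
def pvPreferences : List String :=
  ["claude-3-5-sonnet", "claude-3-5-haiku", "claude-3-opus",
   "claude-3-sonnet", "claude-3-haiku", "claude-3"]

-- the nested 'for pref … for name … return name' loops of A
def pvALoop : List String → List String → Option String
  | [], _ => none
  | pref :: prefs, available =>
    match available.find? (fun name => PySem.Str.startswith name pref) with
    | some name => some name
    | none => pvALoop prefs available

def choose_best_model (available : List String) : Option String :=
  match pvALoop pvPreferences available with
  | some name => some name
  | none => match available with
            | [] => none
            | x :: _ => some x

-- ===== PORT B =====
-- rank(name): index of first matching preference, len(preferences) if none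
def pvRank (prefs : List String) (name : String) : Nat :=
  match prefs with
  | [] => 0
  | pref :: rest => if PySem.Str.startswith name pref then 0 else 1 + pvRank rest name

-- min(available, key=rank): keep the first element achieving the minimal rank
def pvMinBy (r : String → Nat) (x : String) (xs : List String) : String :=
  xs.foldl (fun best n => if r n < r best then n else best) x

def choose_best_model_alt (available : List String) : Option String :=
  match available with
  | [] => none
  | x :: xs => some (pvMinBy (pvRank pvPreferences) x xs)

-- ===== PRECONDITION & SPEC =====
def Spec_choose_best_model (available : List String) (out : Option String) : Prop := out = choose_best_model_alt available
instance (available : List String) (out : Option String) : Decidable (Spec_choose_best_model available out) := by unfold Spec_choose_best_model; infer_instance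

-- ===== CLAIM (what is proved, stated in full; the proofs are below) =====
def Claim_equal_choose_best_model : Prop := ∀ (available : List String), Dom_choose_best_model available → Spec_choose_best_model available (choose_best_model available)

-- ===== LEMMAS AND PROOFS =====

theorem pvALoop_nil (prefs : List String) : pvALoop prefs [] = none := by
  induction prefs with
  | nil => rfl
  | cons p ps ih => simpa [pvALoop, List.find?] using ih

-- if no element of xs has rank below r x, the fold keeps x
theorem pvMinBy_const (r : String → Nat) (x : String) (xs : List String)
    (h : ∀ n ∈ xs, ¬ r n < r x) : pvMinBy r x xs = x := by
  induction xs with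
  | nil => rfl
  | cons n ns ih =>
    have hn : ¬ r n < r x := h n (List.mem_cons_self ..)
    simp only [pvMinBy, List.foldl_cons, if_neg hn] at *
    exact ih (fun m hm => h m (List.mem_cons_of_mem _ hm))

-- if some element has rank 0, the fold returns the first such element
theorem pvMinBy_zero (r : String → Nat) (x : String) (xs : List String)
    (n : String) (h : (x :: xs).find? (fun m => r m == 0) = some n) :
    pvMinBy r x xs = n := by
  induction xs generalizing x with
  | nil =>
    by_cases hx : r x = 0
    · rw [List.find?_cons_of_pos (by simpa using hx)] at h
      simp only [Option.some.injEq] at h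
      simpa [pvMinBy] using h
    · rw [List.find?_cons_of_neg (by simpa using hx)] at h
      simp at h
  | cons m ms ih =>
    by_cases hx : r x = 0
    · rw [List.find?_cons_of_pos (by simpa using hx)] at h
      simp only [Option.some.injEq] at h
      subst h
      exact pvMinBy_const r x (m :: ms) (fun k _ => by omega)
    · have hfind : (m :: ms).find? (fun k => r k == 0) = some n := by
        rwa [List.find?_cons_of_neg (by simpa using hx)] at h
      by_cases hm : r m = 0
      · have hlt : r m < r x := by omega
        simp only [pvMinBy, List.foldl_cons, if_pos hlt]
        rw [List.find?_cons_of_pos (by simpa using hm)] at hfind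
        simp only [Option.some.injEq] at hfind
        subst hfind
        exact pvMinBy_const r m ms (fun k _ => by omega)
      · rw [List.find?_cons_of_neg (by simpa using hm)] at hfind
        simp only [pvMinBy, List.foldl_cons]
        by_cases hlt : r m < r x
        · rw [if_pos hlt]
          exact ih m (by rw [List.find?_cons_of_neg (by simpa using hm)]; exact hfind)
        · rw [if_neg hlt]
          exact ih x (by rw [List.find?_cons_of_neg (by simpa using hx)]; exact hfind)

-- shifting all involved ranks by one does not change the fold
theorem pvMinBy_shift (r r' : String → Nat) (x : String) (xs : List String)
    (hx : r' x = 1 + r x) (hxs : ∀ n ∈ xs, r' n = 1 + r n) :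
    pvMinBy r' x xs = pvMinBy r x xs := by
  induction xs generalizing x with
  | nil => rfl
  | cons n ns ih =>
    have hn : r' n = 1 + r n := hxs n (List.mem_cons_self ..)
    have hrest : ∀ m ∈ ns, r' m = 1 + r m := fun m hm => hxs m (List.mem_cons_of_mem _ hm)
    simp only [pvMinBy, List.foldl_cons] at *
    by_cases hlt : r n < r x
    · have hlt' : r' n < r' x := by rw [hn, hx]; omega
      rw [if_pos hlt', if_pos hlt]
      exact ih n hn hrest
    · have hlt' : ¬ r' n < r' x := by rw [hn, hx]; omega
      rw [if_neg hlt', if_neg hlt]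
      exact ih x hx hrest

theorem pvMain (prefs : List String) (x : String) (xs : List String) :
    (match pvALoop prefs (x :: xs) with
     | some name => some name
     | none => some x) = some (pvMinBy (pvRank prefs) x xs) := by
  induction prefs with
  | nil =>
    simp only [pvALoop]
    rw [pvMinBy_const (pvRank []) x xs (fun n _ => by simp [pvRank])]
  | cons p ps ih =>
    have hpred : ∀ n, (pvRank (p :: ps) n == 0) = PySem.Str.startswith n p := by
      intro n
      cases h : PySem.Str.startswith n p with
      | true =>
        have h' : PySem.Chars.startswith n.toList p.toList = true := by simpa using h
        simp [pvRank, h']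
      | false =>
        have h' : PySem.Chars.startswith n.toList p.toList = false := by simpa using h
        simp [pvRank, h']
    cases hf : (x :: xs).find? (fun name => PySem.Str.startswith name p) with
    | some n =>
      have hf0 : (x :: xs).find? (fun m => pvRank (p :: ps) m == 0) = some n := by
        rw [show (fun m => pvRank (p :: ps) m == 0) = (fun name => PySem.Str.startswith name p)
          from funext hpred]
        exact hf
      simp only [pvALoop, hf]
      rw [pvMinBy_zero (pvRank (p :: ps)) x xs n hf0]
    | none =>
      have hshift : ∀ n ∈ x :: xs, pvRank (p :: ps) n = 1 + pvRank ps n := by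
        intro n hn
        have hall : PySem.Str.startswith n p = false := by
          simpa using List.find?_eq_none.mp hf n hn
        have h' : PySem.Chars.startswith n.toList p.toList = false := by simpa using hall
        simp [pvRank, h']
      rw [pvMinBy_shift (pvRank ps) (pvRank (p :: ps)) x xs
        (hshift x (List.mem_cons_self ..))
        (fun n hn => hshift n (List.mem_cons_of_mem _ hn))]
      simp only [pvALoop, hf]
      exact ih

-- ===== VERDICT (by name: the statement is the Claim_ definition above) =====
theorem choose_best_model_spec : Claim_equal_choose_best_model := by
  intro available _
  unfold Spec_choose_best_model choose_best_model choose_best_model_alt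
  cases available with
  | nil => simp [pvALoop_nil]
  | cons x xs => exact pvMain pvPreferences x xs
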